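-- pv_equiv track=rewrite | github.com/bioscan-ml/dataset | bioscan_dataset/canadian_invertebrates.py | explode_metasplit
-- ===== SOURCE A (Python) =====
-- from typing import Any, Callable, Iterable, List, Optional, Set, Tuple, Union
--
-- VALID_SPLITS = ["pretrain", "train", "val", "test", "test_unseen"]
--
-- SPLIT_ALIASES = {"validation": "val"}
--
-- VALID_METASPLITS = ["all", "seen", "unseen"]
--
-- SEEN_SPLITS = ["train", "val", "test"]
--
-- UNSEEN_SPLITS = ["test_unseen"]
--
-- def explode_metasplit(metasplit: str, verify: bool = False) -> Set[str]:
--     r"""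
--     Convert a metasplit string into its set of constituent splits.
--
--     Parameters
--     ----------
--     metasplit : str
--         The metasplit to explode.
--     verify : bool, default=False
--         If ``True``, verify that the constitutent splits are valid.
--
--     Returns
--     -------
--     set of str
--         The canonical splits within the metasplit.
--
--     Examples
--     --------
--     >>> explode_metasplit("pretrain+train")
--     {'pretrain', 'train'}
--     >>> explode_metasplit("seen")
--     {'train', 'val', 'test'}
--     >>> explode_metasplit("train")
--     {'train'}
--     >>> explode_metasplit("validation")
--     {'val'}
--     """
--     if metasplit is None:
--         metasplit = "all"
--     split_list = [s.strip() for s in metasplit.split("+")]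
--     split_list = [SPLIT_ALIASES.get(s, s) for s in split_list]
--     split_set = set(split_list)
--     if "all" in split_list:
--         split_set.remove("all")
--         split_set |= set(VALID_SPLITS)
--     if "seen" in split_list:
--         split_set.remove("seen")
--         split_set |= set(SEEN_SPLITS)
--     if "unseen" in split_list:
--         split_set.remove("unseen")
--         split_set |= set(UNSEEN_SPLITS)
--
--     if verify:
--         # Verify the constituent splits are valid
--         invalid_splits = split_set - set(VALID_SPLITS)
--         if invalid_splits:
--             msg_valid_names = f"Valid split names are: {', '.join(repr(s) for s in VALID_METASPLITS + VALID_SPLITS)}."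
--             if split_set == {metasplit}:
--                 raise ValueError(f"Invalid split name {repr(metasplit)}. {msg_valid_names}")
--             plural = "s" if len(invalid_splits) > 1 else ""
--             raise ValueError(
--                 f"Invalid split name{plural} {', '.join(repr(s) for s in invalid_splits)} within requested metasplit"
--                 f" {repr(metasplit)}. {msg_valid_names}"
--             )
--
--     return split_set
-- ===== SOURCE B (Python) =====
-- VALID_SPLITS = ["pretrain", "train", "val", "test", "test_unseen"]
--
-- SPLIT_ALIASES = {"validation": "val"}
--
-- VALID_METASPLITS = ["all", "seen", "unseen"]
--
-- SEEN_SPLITS = ["train", "val", "test"]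
--
-- UNSEEN_SPLITS = ["test_unseen"]
--
--
-- def explode_metasplit(metasplit, verify=False):
--     if metasplit is None:
--         metasplit = "all"
--     tokens = [SPLIT_ALIASES.get(t.strip(), t.strip()) for t in metasplit.split("+")]
--
--     def wanted(s):
--         # Characteristic predicate: is the canonical split s requested by the tokens?
--         return (
--             "all" in tokens
--             or (s in SEEN_SPLITS and "seen" in tokens)
--             or (s in UNSEEN_SPLITS and "unseen" in tokens)
--         )
--
--     split_set = {t for t in tokens if t not in VALID_METASPLITS}
--     split_set |= {s for s in VALID_SPLITS if wanted(s)}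
--
--     if verify:
--         # Verify the constituent splits are valid
--         invalid_splits = split_set - set(VALID_SPLITS)
--         if invalid_splits:
--             msg_valid_names = f"Valid split names are: {', '.join(repr(s) for s in VALID_METASPLITS + VALID_SPLITS)}."
--             if split_set == {metasplit}:
--                 raise ValueError(f"Invalid split name {repr(metasplit)}. {msg_valid_names}")
--             plural = "s" if len(invalid_splits) > 1 else ""
--             raise ValueError(
--                 f"Invalid split name{plural} {', '.join(repr(s) for s in invalid_splits)} within requested metasplit"
--                 f" {repr(metasplit)}. {msg_valid_names}"
--             )
--
--     return split_set
-- ===== Notes on version B (the rewrite author's own statement) =====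
-- stated objective: alternative
-- what changed: A expands requested metasplits by mutating the token set (remove the keyword, union in its expansion list, three times); B never unions expansion sets: it keeps the non-meta tokens and filters the fixed universe VALID_SPLITS once through a characteristic predicate wanted(s) that decides per canonical split whether the tokens request it; the verify block is unchanged.
import Mathlib
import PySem

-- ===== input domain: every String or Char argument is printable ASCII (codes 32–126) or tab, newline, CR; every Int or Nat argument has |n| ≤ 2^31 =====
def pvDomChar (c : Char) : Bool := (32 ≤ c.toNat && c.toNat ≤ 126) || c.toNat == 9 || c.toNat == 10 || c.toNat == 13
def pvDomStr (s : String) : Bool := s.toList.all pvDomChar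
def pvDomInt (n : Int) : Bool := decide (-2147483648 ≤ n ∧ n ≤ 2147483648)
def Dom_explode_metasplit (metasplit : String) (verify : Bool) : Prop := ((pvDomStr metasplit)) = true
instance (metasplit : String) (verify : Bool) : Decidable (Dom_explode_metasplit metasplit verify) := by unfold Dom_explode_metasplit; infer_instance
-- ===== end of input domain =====

-- B replaces A's three remove+union mutations of the token set by one filter of the fixed
-- universe VALID_SPLITS through a characteristic predicate (objective: alternative; same value).

-- ===== PORT A =====
def pvVALID_SPLITS : List String := ["pretrain", "train", "val", "test", "test_unseen"]
def pvSPLIT_ALIASES : PySem.Dict String String := PySem.Dict.ofList [("validation", "val")]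
def pvSEEN_SPLITS : List String := ["train", "val", "test"]
def pvUNSEEN_SPLITS : List String := ["test_unseen"]

-- Port of A. `metasplit` is a `str` here, so A's `if metasplit is None` branch has no Lean
-- counterpart. `split_set.remove(m)` is guarded by `m in split_list`, which guarantees
-- membership, so it is exactly `PySem.Set.discard`. The `verify` block either raises
-- ValueError (those inputs are excluded by Pre_) or does nothing, so it contributes nothing
-- to the returned value.
def explode_metasplit (metasplit : String) (verify : Bool) : List String :=
  let split_list := ((PySem.Str.split? metasplit "+").getD []).map PySem.Str.strip
  let split_list := split_list.map (fun s => pvSPLIT_ALIASES.getD s s)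
  let split_set := PySem.Set.ofList split_list
  let split_set := if split_list.contains "all"
    then PySem.Set.union (PySem.Set.discard split_set "all") pvVALID_SPLITS else split_set
  let split_set := if split_list.contains "seen"
    then PySem.Set.union (PySem.Set.discard split_set "seen") pvSEEN_SPLITS else split_set
  let split_set := if split_list.contains "unseen"
    then PySem.Set.union (PySem.Set.discard split_set "unseen") pvUNSEEN_SPLITS else split_set
  split_set

-- ===== PORT B =====
def pvVALID_METASPLITS : List String := ["all", "seen", "unseen"]

-- B's characteristic predicate: is the canonical split s requested by the tokens?
def pvWanted (tokens : List String) (s : String) : Bool :=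
  tokens.contains "all"
    || (pvSEEN_SPLITS.contains s && tokens.contains "seen")
    || (pvUNSEEN_SPLITS.contains s && tokens.contains "unseen")

-- Port of B: the set of non-meta tokens, unioned with the canonical splits of the fixed
-- universe VALID_SPLITS selected by the predicate `wanted` (a set comprehension over the
-- duplicate-free list pvVALID_SPLITS, ported as a filter).
-- B's verify block is identical to A's: it raises outside Pre_ and is otherwise a no-op.
def explode_metasplit_alt (metasplit : String) (verify : Bool) : List String :=
  let tokens := ((PySem.Str.split? metasplit "+").getD []).map
    (fun t => pvSPLIT_ALIASES.getD (PySem.Str.strip t) (PySem.Str.strip t))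
  let split_set := PySem.Set.ofList (tokens.filter (fun t => !(pvVALID_METASPLITS.contains t)))
  PySem.Set.union split_set (pvVALID_SPLITS.filter (pvWanted tokens))

-- ===== PRECONDITION & SPEC =====
-- Pre_ excludes exactly the inputs where A raises ValueError: verify=True with a token
-- (after strip and aliasing) that is neither a valid split nor a metasplit keyword.
def Pre_explode_metasplit (metasplit : String) (verify : Bool) : Prop :=
  verify = false ∨
    ∀ t ∈ ((PySem.Str.split? metasplit "+").getD []).map
        (fun s => PySem.Dict.getD (PySem.Dict.ofList [("validation", "val")]) (PySem.Str.strip s) (PySem.Str.strip s)),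
      t ∈ (["all", "seen", "unseen", "pretrain", "train", "val", "test", "test_unseen"] : List String)

instance (metasplit : String) (verify : Bool) : Decidable (Pre_explode_metasplit metasplit verify) := by
  unfold Pre_explode_metasplit; infer_instance

def pvWitness_explode_metasplit : String × Bool := ("seen+validation", true)

def Spec_explode_metasplit (metasplit : String) (verify : Bool) (out : List String) : Prop := out = explode_metasplit_alt metasplit verify
instance (metasplit : String) (verify : Bool) (out : List String) : Decidable (Spec_explode_metasplit metasplit verify out) := by unfold Spec_explode_metasplit; infer_instance

-- ===== CLAIM (what is proved, stated in full; the proofs are below) =====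
def Claim_equal_explode_metasplit : Prop := ∀ (metasplit : String) (verify : Bool), Dom_explode_metasplit metasplit verify → Pre_explode_metasplit metasplit verify → Spec_explode_metasplit metasplit verify (explode_metasplit metasplit verify)

-- ===== LEMMAS AND PROOFS =====

-- a filter by "≠ x" is the identity on lists drawn from a list not containing x.
theorem pv_filter_id (l tt : List String) (x : String)
    (hsub : ∀ y ∈ l, y ∈ tt) (h : x ∉ tt) :
    List.filter (fun y => !(y == x)) l = l := by
  apply List.filter_eq_self.mpr
  intro y hy
  simp only [Bool.not_eq_eq_eq_not, Bool.not_true, beq_eq_false_iff_ne, ne_eq]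
  rintro rfl; exact h (hsub y hy)

-- discard moves through Set.add of a different element.
theorem pv_discard_add {α : Type} [BEq α] [LawfulBEq α] (s : PySem.Set α) (x y : α)
    (h : y ≠ x) :
    PySem.Set.discard (PySem.Set.add s y) x = PySem.Set.add (PySem.Set.discard s x) y := by
  simp only [PySem.Set.add, PySem.Set.discard, PySem.Set.contains_eq_listContains]
  have hc : List.contains (List.filter (fun z => !(z == x)) s) y = List.contains s y := by
    by_cases hm : y ∈ s
    · simp [List.mem_filter, hm, h]
    · simp [List.mem_filter, hm]
  by_cases hcs : List.contains s y = true
  · rw [if_pos hcs, if_pos (by rw [hc]; exact hcs)]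
  · rw [if_neg hcs, if_neg (by rw [hc]; exact hcs), List.filter_append]
    simp [h]

-- discard moves through a fold of Set.add, filtering the added elements.
theorem pv_discard_foldl_add {α : Type} [BEq α] [LawfulBEq α] (l : List α) (x : α) :
    ∀ s : PySem.Set α, PySem.Set.discard (List.foldl PySem.Set.add s l) x
      = List.foldl PySem.Set.add (PySem.Set.discard s x) (l.filter (fun y => !(y == x))) := by
  induction l with
  | nil => intro s; rfl
  | cons y l ih =>
    intro s
    by_cases hyx : y = x
    · subst hyx
      have hstep : PySem.Set.discard (PySem.Set.add s y) y = PySem.Set.discard s y := by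
        simp only [PySem.Set.add, PySem.Set.discard, PySem.Set.contains_eq_listContains]
        by_cases hcs : List.contains s y = true
        · rw [if_pos hcs]
        · rw [if_neg hcs, List.filter_append]; simp
      simp only [List.foldl_cons, ih, List.filter_cons]
      simp [hstep]
    · simp only [List.foldl_cons, ih, List.filter_cons]
      simp [hyx, pv_discard_add s x y hyx]

-- discard commutes with ofList (both are first-occurrence dedup / filters).
theorem pv_discard_ofList {α : Type} [BEq α] [LawfulBEq α] (l : List α) (x : α) :
    PySem.Set.discard (PySem.Set.ofList l) x
      = PySem.Set.ofList (l.filter (fun y => !(y == x))) := by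
  simpa [PySem.Set.ofList, PySem.Set.empty, PySem.Set.discard] using
    pv_discard_foldl_add l x []

-- discard passes through a union whose right side does not contain the element.
theorem pv_discard_union {α : Type} [BEq α] [LawfulBEq α] (s : PySem.Set α) (e : List α)
    (x : α) (h : x ∉ e) :
    PySem.Set.discard (PySem.Set.union s e) x
      = PySem.Set.union (PySem.Set.discard s x) e := by
  have he : e.filter (fun y => !(y == x)) = e := by
    apply List.filter_eq_self.mpr
    intro y hy
    simp only [Bool.not_eq_eq_eq_not, Bool.not_true, beq_eq_false_iff_ne, ne_eq]
    rintro rfl; exact h hy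
  simp only [PySem.Set.union, PySem.Set.update]
  rw [pv_discard_foldl_add e x s, he]

-- unioning in a list of elements already present is a no-op.
theorem pv_union_absorb {α : Type} [BEq α] [LawfulBEq α] (s : PySem.Set α) (l : List α)
    (h : ∀ x ∈ l, x ∈ s) :
    PySem.Set.union s l = s := by
  induction l generalizing s with
  | nil => rfl
  | cons y l ih =>
    have hy : y ∈ s := h y (by simp)
    simp only [PySem.Set.union, PySem.Set.update, List.foldl_cons] at *
    rw [PySem.Set.add_of_mem hy]
    exact ih s (fun x hx => h x (by simp [hx]))

-- unioning an appended list is two successive unions.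
theorem pv_union_append {α : Type} [BEq α] (s : PySem.Set α) (l₁ l₂ : List α) :
    PySem.Set.union s (l₁ ++ l₂) = PySem.Set.union (PySem.Set.union s l₁) l₂ := by
  simp [PySem.Set.union, PySem.Set.update, List.foldl_append]

theorem pv_seen_sub : ∀ x ∈ pvSEEN_SPLITS, x ∈ pvVALID_SPLITS := by decide

theorem pv_unseen_sub : ∀ x ∈ pvUNSEEN_SPLITS, x ∈ pvVALID_SPLITS := by decide

theorem pv_main (t : List String) :
    (let s0 := PySem.Set.ofList t
     let s1 := if t.contains "all"
       then PySem.Set.union (PySem.Set.discard s0 "all") pvVALID_SPLITS else s0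
     let s2 := if t.contains "seen"
       then PySem.Set.union (PySem.Set.discard s1 "seen") pvSEEN_SPLITS else s1
     if t.contains "unseen"
       then PySem.Set.union (PySem.Set.discard s2 "unseen") pvUNSEEN_SPLITS else s2)
    = PySem.Set.union (PySem.Set.ofList (t.filter (fun x => !(pvVALID_METASPLITS.contains x))))
        (pvVALID_SPLITS.filter (pvWanted t)) := by
  have hfil : t.filter (fun x => !(pvVALID_METASPLITS.contains x))
      = ((t.filter (fun y => !(y == "all"))).filter (fun y => !(y == "seen"))).filter
          (fun y => !(y == "unseen")) := by
    rw [List.filter_filter, List.filter_filter]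
    refine List.filter_congr ?_
    intro x _
    have hc : pvVALID_METASPLITS.contains x = ((x == "all") || ((x == "seen") || (x == "unseen"))) := by
      simp [pvVALID_METASPLITS, beq_eq_decide]
    rw [hc]
    cases x == "all" <;> cases x == "seen" <;> cases x == "unseen" <;> rfl
  have hVs : ("seen" : String) ∉ pvVALID_SPLITS := by decide
  have hVu : ("unseen" : String) ∉ pvVALID_SPLITS := by decide
  have hSu : ("unseen" : String) ∉ pvSEEN_SPLITS := by decide
  have sub1 : ∀ y ∈ List.filter (fun y => !(y == "all")) t, y ∈ t :=
    fun y hy => List.mem_of_mem_filter hy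
  have sub2 : ∀ y ∈ List.filter (fun y => !(y == "seen"))
      (List.filter (fun y => !(y == "all")) t), y ∈ t :=
    fun y hy => List.mem_of_mem_filter (List.mem_of_mem_filter hy)
  simp only [hfil]
  cases hu : t.contains "unseen" <;> cases hs : t.contains "seen" <;>
    cases ha : t.contains "all" <;>
    simp only [hu, hs, ha, Bool.false_eq_true, if_false, if_true]
  · -- none requested: the filters are the identity and the wanted-filter is empty
      have hw : pvVALID_SPLITS.filter (pvWanted t) = [] := by
        rw [show pvWanted t = fun s =>
            (List.contains t "all"
              || (pvSEEN_SPLITS.contains s && List.contains t "seen")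
              || (pvUNSEEN_SPLITS.contains s && List.contains t "unseen")) from rfl]
        simp only [hu, hs, ha]; decide
      have hu' : "unseen" ∉ t := by simpa using hu
      have hs' : "seen" ∉ t := by simpa using hs
      have ha' : "all" ∉ t := by simpa using ha
      rw [hw, pv_filter_id t t "all" (fun y hy => hy) ha',
        pv_filter_id t t "seen" (fun y hy => hy) hs',
        pv_filter_id t t "unseen" (fun y hy => hy) hu']
      rfl
  · -- all only
      have hw : pvVALID_SPLITS.filter (pvWanted t) = pvVALID_SPLITS := by
        rw [show pvWanted t = fun s =>
            (List.contains t "all"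
              || (pvSEEN_SPLITS.contains s && List.contains t "seen")
              || (pvUNSEEN_SPLITS.contains s && List.contains t "unseen")) from rfl]
        simp only [hu, hs, ha]; decide
      have hu' : "unseen" ∉ t := by simpa using hu
      have hs' : "seen" ∉ t := by simpa using hs
      rw [hw, pv_discard_ofList, pv_filter_id _ t "seen" sub1 hs',
        pv_filter_id _ t "unseen" sub1 hu']
  · -- seen only: the wanted-filter is exactly SEEN_SPLITS
      have hw : pvVALID_SPLITS.filter (pvWanted t) = pvSEEN_SPLITS := by
        rw [show pvWanted t = fun s =>
            (List.contains t "all"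
              || (pvSEEN_SPLITS.contains s && List.contains t "seen")
              || (pvUNSEEN_SPLITS.contains s && List.contains t "unseen")) from rfl]
        simp only [hu, hs, ha]; decide
      have hu' : "unseen" ∉ t := by simpa using hu
      have ha' : "all" ∉ t := by simpa using ha
      rw [hw, pv_discard_ofList, pv_filter_id t t "all" (fun y hy => hy) ha',
        pv_filter_id _ t "unseen" (fun y hy => List.mem_of_mem_filter hy) hu']
  · -- seen and all: SEEN ⊆ VALID is absorbed
      have hw : pvVALID_SPLITS.filter (pvWanted t) = pvVALID_SPLITS := by
        rw [show pvWanted t = fun s =>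
            (List.contains t "all"
              || (pvSEEN_SPLITS.contains s && List.contains t "seen")
              || (pvUNSEEN_SPLITS.contains s && List.contains t "unseen")) from rfl]
        simp only [hu, hs, ha]; decide
      have hu' : "unseen" ∉ t := by simpa using hu
      rw [hw, pv_discard_union _ _ _ hVs, pv_discard_ofList, pv_discard_ofList,
        pv_filter_id _ t "unseen" sub2 hu',
        pv_union_absorb (PySem.Set.union _ pvVALID_SPLITS) pvSEEN_SPLITS
          (fun x hx => by
            rw [PySem.Set.mem_union]
            exact Or.inr (pv_seen_sub x hx))]
  · -- unseen only: the wanted-filter is exactly UNSEEN_SPLITS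
      have hw : pvVALID_SPLITS.filter (pvWanted t) = pvUNSEEN_SPLITS := by
        rw [show pvWanted t = fun s =>
            (List.contains t "all"
              || (pvSEEN_SPLITS.contains s && List.contains t "seen")
              || (pvUNSEEN_SPLITS.contains s && List.contains t "unseen")) from rfl]
        simp only [hu, hs, ha]; decide
      have hs' : "seen" ∉ t := by simpa using hs
      have ha' : "all" ∉ t := by simpa using ha
      rw [hw, pv_discard_ofList, pv_filter_id t t "all" (fun y hy => hy) ha',
        pv_filter_id t t "seen" (fun y hy => hy) hs']
  · -- unseen and all: UNSEEN ⊆ VALID is absorbed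
      have hw : pvVALID_SPLITS.filter (pvWanted t) = pvVALID_SPLITS := by
        rw [show pvWanted t = fun s =>
            (List.contains t "all"
              || (pvSEEN_SPLITS.contains s && List.contains t "seen")
              || (pvUNSEEN_SPLITS.contains s && List.contains t "unseen")) from rfl]
        simp only [hu, hs, ha]; decide
      have hs' : "seen" ∉ t := by simpa using hs
      rw [hw, pv_discard_union _ _ _ hVu, pv_discard_ofList, pv_discard_ofList,
        pv_filter_id _ t "seen" sub1 hs',
        pv_union_absorb (PySem.Set.union _ pvVALID_SPLITS) pvUNSEEN_SPLITS
          (fun x hx => by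
            rw [PySem.Set.mem_union]
            exact Or.inr (pv_unseen_sub x hx))]
  · -- unseen and seen: the wanted-filter is SEEN ++ UNSEEN
      have hw : pvVALID_SPLITS.filter (pvWanted t) = pvSEEN_SPLITS ++ pvUNSEEN_SPLITS := by
        rw [show pvWanted t = fun s =>
            (List.contains t "all"
              || (pvSEEN_SPLITS.contains s && List.contains t "seen")
              || (pvUNSEEN_SPLITS.contains s && List.contains t "unseen")) from rfl]
        simp only [hu, hs, ha]; decide
      have ha' : "all" ∉ t := by simpa using ha
      rw [hw, pv_union_append, pv_discard_union _ _ _ hSu, pv_discard_ofList,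
        pv_discard_ofList, pv_filter_id t t "all" (fun y hy => hy) ha']
  · -- all three: SEEN and UNSEEN are both absorbed into VALID
      have hw : pvVALID_SPLITS.filter (pvWanted t) = pvVALID_SPLITS := by
        rw [show pvWanted t = fun s =>
            (List.contains t "all"
              || (pvSEEN_SPLITS.contains s && List.contains t "seen")
              || (pvUNSEEN_SPLITS.contains s && List.contains t "unseen")) from rfl]
        simp only [hu, hs, ha]; decide
      rw [hw, pv_discard_union _ _ _ hVs, pv_discard_union _ _ _ hSu,
        pv_discard_union _ _ _ hVu, pv_discard_ofList, pv_discard_ofList, pv_discard_ofList,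
        pv_union_absorb (PySem.Set.union _ pvVALID_SPLITS) pvSEEN_SPLITS
          (fun x hx => by
            rw [PySem.Set.mem_union]
            exact Or.inr (pv_seen_sub x hx)),
        pv_union_absorb (PySem.Set.union _ pvVALID_SPLITS) pvUNSEEN_SPLITS
          (fun x hx => by
            rw [PySem.Set.mem_union]
            exact Or.inr (pv_unseen_sub x hx))]

-- ===== VERDICT (by name: the statement is the Claim_ definition above) =====
theorem explode_metasplit_spec : Claim_equal_explode_metasplit := by
  intro metasplit verify _ _
  unfold Spec_explode_metasplit explode_metasplit explode_metasplit_alt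
  simp only [List.map_map, Function.comp_def]
  exact pv_main _
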